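-- pv_equiv track=rewrite | github.com/0riginalUsername/Sunrise-Image-Manager | SIM_configured.py | increment_prefix
-- ===== SOURCE A (Python) =====
-- def increment_prefix(prefix: str) -> str:
--     i = len(prefix) - 1
--     while i >= 0 and prefix[i] == 'Z':
--         i -= 1
--     if i == -1:
--         return 'A' * (len(prefix) + 1)
--     return (
--         prefix[:i] +
--         chr(ord(prefix[i]) + 1) +
--         'A' * (len(prefix) - i - 1)
--     )
-- ===== SOURCE B (Python) =====
-- def increment_prefix(prefix: str) -> str:
--     # Recursive carry from the tail instead of A's index-scanning while loop.
--     if not prefix: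
--         return 'A'
--     if prefix[-1] == 'Z':
--         return increment_prefix(prefix[:-1]) + 'A'
--     return prefix[:-1] + chr(ord(prefix[-1]) + 1)
-- ===== Notes on version B (the rewrite author's own statement) =====
-- stated objective: simpler
-- what changed: Replaced the index-maintaining while-loop scan of trailing 'Z's plus slice/replicate reassembly with a three-case tail recursion that propagates the carry and rebuilds the string as it unwinds.
import Mathlib
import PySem

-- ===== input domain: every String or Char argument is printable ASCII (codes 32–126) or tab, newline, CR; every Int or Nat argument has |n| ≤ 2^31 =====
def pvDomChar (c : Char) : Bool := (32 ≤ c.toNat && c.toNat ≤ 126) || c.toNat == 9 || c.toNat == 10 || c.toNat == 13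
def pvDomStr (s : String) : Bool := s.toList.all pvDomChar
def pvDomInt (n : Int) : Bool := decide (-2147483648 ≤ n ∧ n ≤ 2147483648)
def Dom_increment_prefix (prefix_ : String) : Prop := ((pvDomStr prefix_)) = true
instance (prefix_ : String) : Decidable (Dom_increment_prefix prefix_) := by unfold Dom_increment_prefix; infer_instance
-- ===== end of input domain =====

-- B replaces A's while-loop scan of trailing 'Z's with a tail recursion propagating the carry (objective: simpler).

-- ===== PORT A =====
-- A's while loop 'while i >= 0 and prefix[i] == Z: i -= 1' started at len-1;
-- loopA chars k is the final i of the loop started at i = k - 1 (so k = len at the call site).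
def loopA (chars : List Char) : Nat → Int
  | 0 => -1
  | k + 1 => if chars.getD k ' ' == 'Z' then loopA chars k else (k : Int)

-- body of A on the char list; prefix[:i] with i ≥ 0 is take, 'A' * m is replicate
def aBody (chars : List Char) : List Char :=
  let i := loopA chars chars.length
  if i == -1 then List.replicate (chars.length + 1) 'A'
  else
    let k := i.toNat
    chars.take k ++ [Char.ofNat ((chars.getD k ' ').toNat + 1)] ++ List.replicate (chars.length - k - 1) 'A'

def increment_prefix (prefix_ : String) : String := String.ofList (aBody prefix_.toList)

-- ===== PORT B =====
-- B recurses peeling prefix[-1]; represented as head recursion on the REVERSED char list,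
-- the result reversed back at the end (same values in the same order as Source B builds them).
def altRec : List Char → List Char
  | [] => ['A']
  | c :: rest => if c == 'Z' then 'A' :: altRec rest else Char.ofNat (c.toNat + 1) :: rest

def increment_prefix_alt (prefix_ : String) : String :=
  String.ofList ((altRec prefix_.toList.reverse).reverse)

-- ===== PRECONDITION & SPEC =====
def Spec_increment_prefix (prefix_ : String) (out : String) : Prop := out = increment_prefix_alt prefix_
instance (prefix_ : String) (out : String) : Decidable (Spec_increment_prefix prefix_ out) := by unfold Spec_increment_prefix; infer_instance

-- ===== CLAIM (what is proved, stated in full; the proofs are below) =====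
def Claim_equal_increment_prefix : Prop := ∀ (prefix_ : String), Dom_increment_prefix prefix_ → Spec_increment_prefix prefix_ (increment_prefix prefix_)

-- ===== LEMMAS AND PROOFS =====

-- unfolding equation for one step of A's while loop
theorem loopA_succ (xs : List Char) (k : Nat) :
    loopA xs (k + 1) = if xs.getD k ' ' == 'Z' then loopA xs k else (k : Int) := rfl

-- the loop only looks below k, so a later element is irrelevant
theorem loopA_append (xs : List Char) (c : Char) :
    ∀ k, k ≤ xs.length → loopA (xs ++ [c]) k = loopA xs k := by
  intro k
  induction k with
  | zero => intro _; rfl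
  | succ k ih =>
    intro hk
    have hk' : k < xs.length := hk
    rw [loopA_succ, loopA_succ, ih (Nat.le_of_lt hk')]
    simp [List.getD, List.getElem?_append_left hk']

theorem loopA_range (xs : List Char) : ∀ k, loopA xs k = -1 ∨ ∃ j : Nat, j < k ∧ loopA xs k = (j : Int) := by
  intro k
  induction k with
  | zero => left; rfl
  | succ k ih =>
    by_cases h : xs.getD k ' ' == 'Z'
    · rw [loopA_succ, if_pos h]
      rcases ih with h1 | ⟨j, hj, hv⟩
      · left; exact h1
      · right; exact ⟨j, Nat.lt_succ_of_lt hj, hv⟩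
    · right; exact ⟨k, Nat.lt_succ_self k, by rw [loopA_succ, if_neg h]⟩

theorem aBody_nonZ (xs : List Char) (c : Char) (hc : c ≠ 'Z') :
    aBody (xs ++ [c]) = xs ++ [Char.ofNat (c.toNat + 1)] := by
  have hloop : loopA (xs ++ [c]) (xs.length + 1) = (xs.length : Int) := by
    rw [loopA_succ, if_neg]
    simp [List.getD, hc]
  have hne : (((xs.length : Int)) == (-1 : Int)) = false := by
    simp only [beq_eq_false_iff_ne, ne_eq]; omega
  simp [aBody, hloop, hne, List.getD, List.take_left]

theorem aBody_Z (xs : List Char) : aBody (xs ++ ['Z']) = aBody xs ++ ['A'] := by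
  have hloop : loopA (xs ++ ['Z']) (xs.length + 1) = loopA xs xs.length := by
    rw [loopA_succ, if_pos (by simp [List.getD]), loopA_append xs 'Z' xs.length (le_refl _)]
  rcases loopA_range xs xs.length with h1 | ⟨j, hj, hv⟩
  · simp [aBody, hloop, h1, List.replicate_succ']
  · have hne : (((j : Int)) == (-1 : Int)) = false := by
      simp only [beq_eq_false_iff_ne, ne_eq]; omega
    have hrep : xs.length + 1 - j - 1 = (xs.length - j - 1) + 1 := by omega
    have htake : (xs ++ ['Z']).take j = xs.take j := List.take_append_of_le_length (Nat.le_of_lt hj)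
    have hget2 : (xs ++ ['Z']).getD j ' ' = xs.getD j ' ' := by
      simp [List.getD, List.getElem?_append_left hj]
    simp only [List.getD] at hget2
    simp only [aBody, List.length_append, List.length_cons, List.length_nil, Nat.add_zero,
      hloop, hv, hne, Bool.false_eq_true, if_false, Int.toNat_natCast, hrep, htake, hget2,
      List.replicate_succ']
    simp [hget2]

theorem altRec_rev (rc : List Char) : (altRec rc).reverse = aBody rc.reverse := by
  induction rc with
  | nil => rfl
  | cons c rest ih =>
    by_cases h : c = 'Z'
    · subst h
      simp only [List.reverse_cons]
      rw [aBody_Z, ← ih]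
      simp [altRec]
    · simp only [List.reverse_cons]
      rw [aBody_nonZ rest.reverse c h]
      simp [altRec, h]

-- ===== VERDICT (by name: the statement is the Claim_ definition above) =====
theorem increment_prefix_spec : Claim_equal_increment_prefix := by
  intro prefix_ _
  show increment_prefix prefix_ = increment_prefix_alt prefix_
  unfold increment_prefix increment_prefix_alt
  rw [altRec_rev, List.reverse_reverse]
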